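-- pv_equiv track=rewrite | github.com/hungaborhorvath/advent_of_code | 2025/10/aoc_2510.py | matrix_for_buttons
-- ===== SOURCE A (Python) =====
-- def matrix_for_buttons(
--         joltage:list[int],
--         all_buttons:tuple[tuple[int, ...], ...]
--         ) -> list[list[int]]:
--     matrix = []
--     for button in all_buttons:
--         row = []
--         for i, _ in enumerate(joltage):
--             if i in button:
--                 row.append(1)
--             else:
--                 row.append(0)
--         matrix.append(row)
--     return matrix
-- ===== SOURCE B (Python) =====
-- def matrix_for_buttons(joltage, all_buttons):
--     # scatter: zero row, write 1 at each in-range index of the button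
--     n = len(joltage)
--     def row_for(button):
--         row = [0] * n
--         for idx in button:
--             if 0 <= idx < n:
--                 row[idx] = 1
--         return row
--     return [row_for(button) for button in all_buttons]
-- ===== Notes on version B (the rewrite author's own statement) =====
-- stated objective: faster
-- what changed: Inverts the inner loop from gathering (scan every joltage index, test membership in the button) to scattering (start from a zero row and set row[idx]=1 for each in-range index of the button), and builds the matrix with a comprehension over a row helper instead of an accumulating outer loop.
import Mathlib
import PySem

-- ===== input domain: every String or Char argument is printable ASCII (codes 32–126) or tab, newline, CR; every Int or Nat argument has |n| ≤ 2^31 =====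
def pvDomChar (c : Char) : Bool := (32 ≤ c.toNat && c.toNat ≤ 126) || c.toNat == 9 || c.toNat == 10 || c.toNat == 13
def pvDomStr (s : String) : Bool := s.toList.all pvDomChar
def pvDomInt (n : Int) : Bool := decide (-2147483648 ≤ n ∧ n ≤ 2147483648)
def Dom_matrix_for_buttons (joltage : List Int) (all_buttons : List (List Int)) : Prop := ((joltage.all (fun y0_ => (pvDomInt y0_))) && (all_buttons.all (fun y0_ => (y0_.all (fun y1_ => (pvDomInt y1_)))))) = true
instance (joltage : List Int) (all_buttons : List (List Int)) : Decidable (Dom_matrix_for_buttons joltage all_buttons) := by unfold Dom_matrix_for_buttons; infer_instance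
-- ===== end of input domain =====

-- B replaces the per-index membership scan (gather) with a row helper that writes 1s at the button's in-range indices into a zero row (scatter); outer loop becomes a comprehension/map.


-- ===== PORT A =====
def matrix_for_buttons (joltage : List Int) (all_buttons : List (List Int)) : List (List Int) :=
  all_buttons.foldl (fun matrix button =>
    matrix ++ [(PySem.List.enumerate joltage).foldl
      (fun row iv => if iv.1 ∈ button then row ++ [(1 : Int)] else row ++ [(0 : Int)]) []]) []

-- ===== PORT B =====
-- Source B's inner for-loop: scatter writes into the zero row
def pvRowFor (n : Nat) (button : List Int) : List Int :=
  button.foldl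
    (fun row idx => if 0 ≤ idx ∧ idx < (n : Int) then PySem.List.pySetD row idx 1 else row)
    (List.replicate n (0 : Int))

def matrix_for_buttons_alt (joltage : List Int) (all_buttons : List (List Int)) : List (List Int) :=
  all_buttons.map (pvRowFor joltage.length)

-- ===== PRECONDITION & SPEC =====
def Spec_matrix_for_buttons (joltage : List Int) (all_buttons : List (List Int)) (out : List (List Int)) : Prop := out = matrix_for_buttons_alt joltage all_buttons
instance (joltage : List Int) (all_buttons : List (List Int)) (out : List (List Int)) : Decidable (Spec_matrix_for_buttons joltage all_buttons out) := by unfold Spec_matrix_for_buttons; infer_instance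

-- ===== CLAIM (what is proved, stated in full; the proofs are below) =====
def Claim_equal_matrix_for_buttons : Prop := ∀ (joltage : List Int) (all_buttons : List (List Int)), Dom_matrix_for_buttons joltage all_buttons → Spec_matrix_for_buttons joltage all_buttons (matrix_for_buttons joltage all_buttons)

-- ===== LEMMAS AND PROOFS =====

-- A's inner append-loop is a map over the enumerated list
theorem rowA_foldl_eq_map (button : List Int) (xs : List Int) :
    ∀ (s : Int) (acc : List Int),
    (PySem.List.enumerate xs s).foldl
      (fun row iv => if iv.1 ∈ button then row ++ [(1 : Int)] else row ++ [(0 : Int)]) acc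
    = acc ++ (PySem.List.enumerate xs s).map
        (fun iv => if iv.1 ∈ button then (1 : Int) else 0) := by
  induction xs with
  | nil => intro s acc; simp [PySem.List.enumerate_nil]
  | cons x xs ih =>
      intro s acc
      rw [PySem.List.enumerate_cons, List.foldl_cons, List.map_cons, ih]
      by_cases h : s ∈ button <;> simp [h]

-- the gather map over enumerate only depends on the indices: it is a map over range
theorem rowA_map_range (button : List Int) (xs : List Int) :
    (PySem.List.enumerate xs 0).map (fun iv => if iv.1 ∈ button then (1 : Int) else 0)
    = (List.range xs.length).map (fun (i : Nat) => if ((i : Int) ∈ button) then (1 : Int) else 0) := by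
  apply List.ext_getElem
  · simp [PySem.List.length_enumerate]
  · intro k h1 h2
    simp [PySem.List.getElem_enumerate]

-- setting position k of a map-over-range row
theorem set_map_range (n k : Nat) (g : Nat → Int) (v : Int) :
    ((List.range n).map g).set k v
      = (List.range n).map (fun i => if i = k then v else g i) := by
  apply List.ext_getElem
  · simp
  · intro i h1 h2
    simp only [List.getElem_set, List.getElem_map, List.getElem_range]
    by_cases hik : k = i
    · subst hik; simp
    · rw [if_neg hik, if_neg (fun h : i = k => hik h.symm)]

-- B's scatter loop starting from any map-over-range row
theorem rowB_eq (n : Nat) : ∀ (button : List Int) (g : Nat → Int),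
    button.foldl
      (fun row idx => if 0 ≤ idx ∧ idx < (n : Int) then PySem.List.pySetD row idx 1 else row)
      ((List.range n).map g)
    = (List.range n).map (fun (i : Nat) => if ((i : Int) ∈ button) then (1 : Int) else g i) := by
  intro button
  induction button with
  | nil => intro g; simp
  | cons b bs ih =>
      intro g
      rw [List.foldl_cons]
      by_cases hb : 0 ≤ b ∧ b < (n : Int)
      · rw [if_pos hb, PySem.List.pySetD_of_nonneg _ _ hb.1, set_map_range, ih]
        apply List.map_congr_left
        intro i hi
        simp only [List.mem_range] at hi
        by_cases hbs : (i : Int) ∈ bs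
        · simp [hbs, List.mem_cons]
        · by_cases hib : (i : Int) = b
          · have hi2 : i = b.toNat := by omega
            have hmem : ((i : Int) ∈ b :: bs) := by simp [List.mem_cons, hib]
            rw [if_pos hmem, if_neg hbs, if_pos hi2]
          · have hi2 : i ≠ b.toNat := by omega
            simp [List.mem_cons, hbs, hib, hi2]
      · rw [if_neg hb, ih]
        apply List.map_congr_left
        intro i hi
        simp only [List.mem_range] at hi
        by_cases hbs : (i : Int) ∈ bs
        · simp [hbs, List.mem_cons]
        · have hib : (i : Int) ≠ b := by omega
          simp [List.mem_cons, hbs, hib]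

-- each row of B equals the gather row over range
theorem rowFor_eq (n : Nat) (button : List Int) :
    pvRowFor n button
    = (List.range n).map (fun (i : Nat) => if ((i : Int) ∈ button) then (1 : Int) else 0) := by
  unfold pvRowFor
  have : List.replicate n (0 : Int) = (List.range n).map (fun _ => (0 : Int)) := by simp
  rw [this, rowB_eq]

-- A's outer append-loop is a map over the button list
theorem foldl_append_singleton {α β : Type} (f : α → β) :
    ∀ (bs : List α) (acc : List β),
    bs.foldl (fun m b => m ++ [f b]) acc = acc ++ bs.map f := by
  intro bs
  induction bs with
  | nil => intro acc; simp
  | cons b bs ih => intro acc; simp [ih]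

-- ===== VERDICT (by name: the statement is the Claim_ definition above) =====
theorem matrix_for_buttons_spec : Claim_equal_matrix_for_buttons := by
  intro joltage all_buttons _
  show _ = _
  unfold matrix_for_buttons matrix_for_buttons_alt
  rw [foldl_append_singleton (fun button => (PySem.List.enumerate joltage).foldl _ [])]
  simp only [List.nil_append]
  apply List.map_congr_left
  intro button _
  rw [rowA_foldl_eq_map, rowA_map_range, rowFor_eq]
  simp
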